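-- pv_equiv track=rewrite | github.com/onyuki/1400-zadach-po-programmirivaniu | 5.1-5.43.py | sum_digits_5_40
-- ===== SOURCE A (Python) =====
-- def sum_digits_5_40(number):
--     n = abs(int(number))
--     s = 0
--     count = 0
--     while n > 0 and count < 9:
--         s += n % 10
--         n //= 10
--         count += 1
--     return s
-- ===== SOURCE B (Python) =====
-- def sum_digits_5_40(number):
--     d = str(abs(int(number)))
--     return sum(int(ch) for ch in d[-9:])
-- ===== Notes on version B (the rewrite author's own statement) =====
-- stated objective: idiomatic
-- what changed: Replaces the counted while-loop that peels digits with % and // and mutates three variables by a single expression over the decimal string: the last-nine-digit cap becomes the slice d[-9:] and the digit sum a sum over its characters.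
import Mathlib
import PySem

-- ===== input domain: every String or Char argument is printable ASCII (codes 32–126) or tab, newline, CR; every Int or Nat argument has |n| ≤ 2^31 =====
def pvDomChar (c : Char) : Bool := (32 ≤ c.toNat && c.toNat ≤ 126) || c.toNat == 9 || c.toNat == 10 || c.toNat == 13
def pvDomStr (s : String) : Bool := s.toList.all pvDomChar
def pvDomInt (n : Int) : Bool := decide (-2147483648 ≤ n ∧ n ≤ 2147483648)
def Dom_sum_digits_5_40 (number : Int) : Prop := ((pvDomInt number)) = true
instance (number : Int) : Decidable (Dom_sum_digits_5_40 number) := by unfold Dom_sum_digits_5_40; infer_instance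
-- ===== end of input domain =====

-- B replaces A's counted %/// digit-peeling loop by one expression over the decimal
-- string: slice off the last nine characters and sum their int values (idiomatic; not faster).

-- ===== PORT A =====
-- the while loop: guard 'n > 0 and count < 9'; count starts at 0 and rises by 1 each
-- iteration, so the body runs at most 9 times — fuel 9 with the original guard is exact
def sumDigitsGoA : Nat → Int → Int → Int → Int
  | 0, _, s, _ => s
  | f + 1, n, s, count =>
    if n > 0 ∧ count < 9 then
      sumDigitsGoA f (PySem.Int.floordiv n 10) (s + PySem.Int.mod n 10) (count + 1)
    else s

def sum_digits_5_40 (number : Int) : Int :=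
  sumDigitsGoA 9 |number| 0 0

-- ===== PORT B =====
-- int(ch): each ch in d[-9:] is a decimal digit, so ofChars? always returns a value (.getD 0 is never the default)
def sum_digits_5_40_alt (number : Int) : Int :=
  let d := PySem.Int.toChars |number|
  ((PySem.List.slice d (some (-9)) none).map (fun c => (PySem.Int.ofChars? [c]).getD 0)).sum

-- ===== PRECONDITION & SPEC =====
def Spec_sum_digits_5_40 (number : Int) (out : Int) : Prop := out = sum_digits_5_40_alt number
instance (number : Int) (out : Int) : Decidable (Spec_sum_digits_5_40 number out) := by unfold Spec_sum_digits_5_40; infer_instance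

-- ===== CLAIM (what is proved, stated in full; the proofs are below) =====
def Claim_equal_sum_digits_5_40 : Prop := ∀ (number : Int), Dom_sum_digits_5_40 number → Spec_sum_digits_5_40 number (sum_digits_5_40 number)

-- ===== LEMMAS AND PROOFS =====

-- common specification: sum of the k lowest decimal digits of a natural number
def lowSum : Nat → Nat → Int
  | 0, _ => 0
  | k + 1, m => ((m % 10 : Nat) : Int) + lowSum k (m / 10)

lemma lowSum_zero : ∀ k, lowSum k 0 = 0
  | 0 => rfl
  | k + 1 => by simp [lowSum, lowSum_zero k]

-- A's loop computes s + lowSum f n when the counter stands at 9 - f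
lemma sumDigitsGoA_eq (f : Nat) : ∀ (m : Nat) (s : Int),
    sumDigitsGoA f (m : Int) s (9 - (f : Int)) = s + lowSum f m := by
  induction f with
  | zero => intro m s; simp [sumDigitsGoA, lowSum]
  | succ f ih =>
    intro m s
    by_cases hm : 0 < m
    · have hguard : ((m : Int) > 0 ∧ (9 : Int) - ((f + 1 : Nat) : Int) < 9) := by
        constructor
        · exact_mod_cast hm
        · push_cast; omega
      have h1 : PySem.Int.floordiv (m : Int) 10 = ((m / 10 : Nat) : Int) := by
        exact_mod_cast PySem.Int.floordiv_natCast m 10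
      have h2 : PySem.Int.mod (m : Int) 10 = ((m % 10 : Nat) : Int) := by
        exact_mod_cast PySem.Int.mod_natCast m 10
      have hc : (9 : Int) - ((f + 1 : Nat) : Int) + 1 = 9 - (f : Int) := by push_cast; ring
      rw [sumDigitsGoA, if_pos hguard, h1, h2, hc, ih (m / 10) (s + ((m % 10 : Nat) : Int))]
      simp [lowSum]; ring
    · have hm0 : m = 0 := by omega
      subst hm0
      rw [sumDigitsGoA, if_neg (by simp)]
      simp [lowSum_zero]

-- accumulator lemma for Nat.toDigitsCore
lemma toDigitsCore_acc (f : Nat) : ∀ (n : Nat) (acc : List Char),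
    Nat.toDigitsCore 10 f n acc = Nat.toDigitsCore 10 f n [] ++ acc := by
  induction f with
  | zero => intro n acc; simp [Nat.toDigitsCore]
  | succ f ih =>
    intro n acc
    simp only [Nat.toDigitsCore]
    by_cases h : n / 10 = 0
    · simp [h]
    · simp only [h, if_false]
      rw [ih (n / 10) (Nat.digitChar (n % 10) :: acc), ih (n / 10) [Nat.digitChar (n % 10)]]
      simp

-- any fuel above n gives the same result as fuel n + 1
lemma toDigitsCore_fuel (n : Nat) : ∀ (f : Nat) (acc : List Char), n < f →
    Nat.toDigitsCore 10 f n acc = Nat.toDigitsCore 10 (n + 1) n acc := by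
  induction n using Nat.strong_induction_on with
  | _ n ih =>
    intro f acc hf
    match f, hf with
    | f + 1, _ =>
      simp only [Nat.toDigitsCore]
      by_cases h : n / 10 = 0
      · simp [h]
      · simp only [h, if_false]
        have hn : 10 ≤ n := by
          by_contra hc
          exact h (Nat.div_eq_of_lt (by omega))
        have h10 : n / 10 < n := Nat.div_lt_self (by omega) (by norm_num)
        rw [ih (n / 10) h10 f _ (by omega), ih (n / 10) h10 n _ (by omega)]

lemma toDigits_lt (m : Nat) (h : m < 10) : Nat.toDigits 10 m = [Nat.digitChar m] := by
  simp [Nat.toDigits, Nat.toDigitsCore, Nat.div_eq_of_lt h, Nat.mod_eq_of_lt h]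

lemma toDigits_ge (m : Nat) (h : 10 ≤ m) :
    Nat.toDigits 10 m = Nat.toDigits 10 (m / 10) ++ [Nat.digitChar (m % 10)] := by
  have hne : m / 10 ≠ 0 := by
    have := Nat.div_pos h (by norm_num)
    omega
  have h10 : m / 10 < m := Nat.div_lt_self (by omega) (by norm_num)
  show Nat.toDigitsCore 10 (m + 1) m [] = Nat.toDigitsCore 10 (m / 10 + 1) (m / 10) [] ++ _
  rw [show Nat.toDigitsCore 10 (m + 1) m [] =
        Nat.toDigitsCore 10 m (m / 10) [Nat.digitChar (m % 10)] from by
      simp [Nat.toDigitsCore, hne]]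
  rw [toDigitsCore_acc, toDigitsCore_fuel (m / 10) m [] (by omega)]

lemma val_digitChar (d : Nat) (h : d < 10) :
    (PySem.Int.ofChars? [Nat.digitChar d]).getD 0 = (d : Int) := by
  interval_cases d <;> decide

-- sum of the int values of the last k characters of str(m) = lowSum k m
lemma sum_drop_toDigits (m : Nat) : ∀ k : Nat,
    (((Nat.toDigits 10 m).drop ((Nat.toDigits 10 m).length - k)).map
      (fun c => (PySem.Int.ofChars? [c]).getD 0)).sum = lowSum k m := by
  induction m using Nat.strong_induction_on with
  | _ m ih =>
    intro k
    by_cases h : m < 10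
    · rw [toDigits_lt m h]
      cases k with
      | zero => simp [lowSum]
      | succ k =>
        have h0 : ([Nat.digitChar m].length - (k + 1)) = 0 := by simp
        rw [h0, List.drop_zero]
        simp [val_digitChar m h, lowSum, Nat.mod_eq_of_lt h, Nat.div_eq_of_lt h, lowSum_zero]
    · have h10 : m / 10 < m := Nat.div_lt_self (by omega) (by norm_num)
      rw [toDigits_ge m (by omega)]
      cases k with
      | zero => simp [lowSum]
      | succ k =>
        have hle : (Nat.toDigits 10 (m / 10)).length + 1 - (k + 1)
            ≤ (Nat.toDigits 10 (m / 10)).length := by omega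
        rw [List.length_append, List.length_singleton,
          List.drop_append_of_le_length hle]
        have harg : (Nat.toDigits 10 (m / 10)).length + 1 - (k + 1)
            = (Nat.toDigits 10 (m / 10)).length - k := by omega
        rw [harg]
        simp only [List.map_append, List.map_cons, List.map_nil, List.sum_append,
          List.sum_cons, List.sum_nil]
        rw [ih (m / 10) h10 k]
        simp [val_digitChar (m % 10) (Nat.mod_lt m (by norm_num)), lowSum]
        ring

lemma A_eq_lowSum (number : Int) : sum_digits_5_40 number = lowSum 9 number.natAbs := by
  have habs : |number| = (number.natAbs : Int) := by
    exact_mod_cast Int.abs_eq_natAbs number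
  rw [sum_digits_5_40, habs]
  have := sumDigitsGoA_eq 9 number.natAbs 0
  norm_num at this
  simpa using this

lemma B_eq_lowSum (number : Int) : sum_digits_5_40_alt number = lowSum 9 number.natAbs := by
  have habs : |number| = (number.natAbs : Int) := by
    exact_mod_cast Int.abs_eq_natAbs number
  have htc : ∀ m : Nat, PySem.Int.toChars (m : Int) = Nat.toDigits 10 m := by
    intro m
    simp only [PySem.Int.toChars]
    rw [if_neg (by omega : ¬ ((m : Int) < 0))]
    norm_num
  simp only [sum_digits_5_40_alt]
  rw [habs, htc number.natAbs, PySem.List.slice_from_neg_ofNat _ 9 (by omega)]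
  exact sum_drop_toDigits number.natAbs 9

-- ===== VERDICT (by name: the statement is the Claim_ definition above) =====
theorem sum_digits_5_40_spec : Claim_equal_sum_digits_5_40 := by
  intro number _
  unfold Spec_sum_digits_5_40
  rw [A_eq_lowSum, B_eq_lowSum]
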